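-- pv_equiv track=rewrite | github.com/JJTech0130/pypush | emulated/mparser.py | get_oid
-- ===== SOURCE A (Python) =====
-- def get_oid(db, p):
--     """OID parser implementation from:
--
--     http://opensource.apple.com/source/Security/Security-57337.20.44/
--     OSX/libsecurity_cdsa_utilities/lib/cssmdata.cpp
--     """
--
--     q = 0
--
--     while True:
--         q = q * 128 + (db[p] & ~0x80)
--
--         if p < len(db) and db[p] & 0x80:
--             p += 1
--         else:
--             p += 1
--             break
--
--     return q, p
-- ===== SOURCE B (Python) =====
-- def get_oid(db, p):
--     # Two-pass: scan for the terminating byte, then fold the digits.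
--     start = p
--     while db[p] & 0x80:
--         p += 1
--     p += 1
--     q = 0
--     for k in range(start, p):
--         q = q * 128 + (db[k] & ~0x80)
--     return q, p
-- ===== Notes on version B (the rewrite author's own statement) =====
-- stated objective: alternative
-- what changed: A interleaves accumulation and scanning in one while-loop; B first scans for the terminating byte (high bit clear), then folds q = q*128 + (b & ~0x80) over the fixed byte range in a separate pass.
import Mathlib
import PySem

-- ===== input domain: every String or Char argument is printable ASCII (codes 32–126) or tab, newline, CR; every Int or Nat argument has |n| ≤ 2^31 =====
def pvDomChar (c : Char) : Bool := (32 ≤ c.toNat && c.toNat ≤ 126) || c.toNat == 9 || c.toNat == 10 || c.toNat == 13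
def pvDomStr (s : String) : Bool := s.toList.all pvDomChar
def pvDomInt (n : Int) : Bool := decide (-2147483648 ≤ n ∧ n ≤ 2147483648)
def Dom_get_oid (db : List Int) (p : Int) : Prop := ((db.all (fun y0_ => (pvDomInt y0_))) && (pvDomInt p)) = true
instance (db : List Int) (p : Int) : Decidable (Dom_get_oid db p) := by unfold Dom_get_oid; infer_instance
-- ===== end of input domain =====

-- B replaces A's single interleaved accumulate-and-advance loop by a scan for the
-- terminating byte followed by a separate fold over the byte range (alternative decomposition).

-- ===== PORT A =====
-- fuel-bounded transliteration of A's `while True` loop; `none` from pyGet? = IndexError (excluded by Pre_)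
def get_oid_loop (db : List Int) : Nat → Int → Int → Int × Int
  | 0, q, p => (q, p)
  | fuel+1, q, p =>
    match PySem.List.pyGet? db p with
    | none => (q, p)
    | some b =>
      let q' := q * 128 + PySem.Int.band b (-129)
      if p < (db.length : Int) ∧ PySem.Int.band b 128 ≠ 0 then
        get_oid_loop db fuel q' (p + 1)
      else (q', p + 1)

def get_oid (db : List Int) (p : Int) : Int × Int :=
  get_oid_loop db (2 * db.length + 1) 0 p

-- ===== PORT B =====
-- first pass: advance p while db[p] has the high bit set (fuel-bounded; `none` = IndexError, excluded by Pre_)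
def get_oid_scan (db : List Int) : Nat → Int → Int
  | 0, p => p
  | fuel+1, p =>
    match PySem.List.pyGet? db p with
    | none => p
    | some b => if PySem.Int.band b 128 ≠ 0 then get_oid_scan db fuel (p + 1) else p

def get_oid_alt (db : List Int) (p : Int) : Int × Int :=
  let start := p
  let pEnd := get_oid_scan db (2 * db.length + 1) p + 1
  let q := (PySem.List.pyRange start pEnd 1).foldl
    (fun q k => q * 128 + PySem.Int.band (PySem.List.pyGetD db k 0) (-129)) 0
  (q, pEnd)

-- ===== PRECONDITION & SPEC =====
-- Pre_ excludes exactly the inputs on which A raises IndexError: either the start index p is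
-- out of range, or every byte walked from p onwards has the high bit set so the walk runs off
-- the end of the list. (B raises IndexError at the same place on those inputs.)
def Pre_get_oid (db : List Int) (p : Int) : Prop :=
  ∃ k : Nat, k < 2 * db.length + 1 ∧ -(db.length : Int) ≤ p ∧ p + k < (db.length : Int) ∧
    (∀ m : Nat, m < k → PySem.Int.band (PySem.List.pyGetD db (p + m) 0) 128 ≠ 0) ∧
    PySem.Int.band (PySem.List.pyGetD db (p + k) 0) 128 = 0
instance (db : List Int) (p : Int) : Decidable (Pre_get_oid db p) := by unfold Pre_get_oid; infer_instance

def pvWitness_get_oid : List Int × Int := ([134, 5], 0)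

def Spec_get_oid (db : List Int) (p : Int) (out : Int × Int) : Prop := out = get_oid_alt db p
instance (db : List Int) (p : Int) (out : Int × Int) : Decidable (Spec_get_oid db p out) := by unfold Spec_get_oid; infer_instance

-- ===== CLAIM (what is proved, stated in full; the proofs are below) =====
def Claim_equal_get_oid : Prop := ∀ (db : List Int) (p : Int), Dom_get_oid db p → Pre_get_oid db p → Spec_get_oid db p (get_oid db p)

-- ===== LEMMAS AND PROOFS =====

-- under InRange, pyGet? returns exactly the pyGetD value
theorem pyGet?_eq_some_pyGetD_int (xs : List Int) (i : Int)
    (h1 : -(xs.length : Int) ≤ i) (h2 : i < (xs.length : Int)) :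
    PySem.List.pyGet? xs i = some (PySem.List.pyGetD xs i 0) := by
  unfold PySem.List.pyGetD
  cases hx : PySem.List.pyGet? xs i with
  | some b => rfl
  | none => exact absurd ⟨h1, h2⟩ (Iff.mp (PySem.List.pyGet?_eq_none_iff xs i) hx)

theorem get_oid_main (db : List Int) :
    ∀ (k : Nat) (p q : Int) (fuel : Nat), k < fuel →
    (-(db.length : Int) ≤ p ∧ p + k < (db.length : Int)) →
    (∀ m : Nat, m < k → PySem.Int.band (PySem.List.pyGetD db (p + m) 0) 128 ≠ 0) →
    PySem.Int.band (PySem.List.pyGetD db (p + k) 0) 128 = 0 →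
    get_oid_loop db fuel q p =
      ((PySem.List.pyRange p (p + k + 1) 1).foldl
        (fun q j => q * 128 + PySem.Int.band (PySem.List.pyGetD db j 0) (-129)) q, p + k + 1) ∧
    get_oid_scan db fuel p = p + k := by
  intro k
  induction k with
  | zero =>
    intro p q fuel hf hin hset hclr
    obtain ⟨fuel, rfl⟩ : ∃ f, fuel = f + 1 := ⟨fuel - 1, by omega⟩
    have hget : PySem.List.pyGet? db p = some (PySem.List.pyGetD db p 0) :=
      pyGet?_eq_some_pyGetD_int db p hin.1 (by have := hin.2; push_cast at this; omega)
    have hclr' : PySem.Int.band (PySem.List.pyGetD db p 0) 128 = 0 := by simpa using hclr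
    refine ⟨?_, ?_⟩
    · simp only [get_oid_loop, hget]
      rw [if_neg (by simp [hclr'])]
      rw [PySem.List.pyRange_one_cons (by omega), PySem.List.pyRange_one_eq_nil (by omega)]
      simp
    · simp only [get_oid_scan, hget]
      rw [if_neg (by simp [hclr'])]
      simp
  | succ k ih =>
    intro p q fuel hf hin hset hclr
    obtain ⟨fuel, rfl⟩ : ∃ f, fuel = f + 1 := ⟨fuel - 1, by omega⟩
    have hget : PySem.List.pyGet? db p = some (PySem.List.pyGetD db p 0) :=
      pyGet?_eq_some_pyGetD_int db p hin.1 (by have := hin.2; push_cast at this; omega)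
    have hset0 : PySem.Int.band (PySem.List.pyGetD db p 0) 128 ≠ 0 := by
      have := hset 0 (Nat.succ_pos k); simpa using this
    have hlt : p < (db.length : Int) := by have := hin.2; push_cast at this; omega
    have ihs := ih (p + 1) (q * 128 + PySem.Int.band (PySem.List.pyGetD db p 0) (-129)) fuel (by omega)
      ⟨by omega, by have := hin.2; push_cast at this ⊢; omega⟩
      (fun m hm => by
        have := hset (m + 1) (by omega); push_cast at this
        rw [show p + 1 + (m : Int) = p + ((m : Int) + 1) from by ring]; exact this)
      (by
        have := hclr; push_cast at this
        rw [show p + 1 + (k : Int) = p + ((k : Int) + 1) from by ring]; exact this)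
    refine ⟨?_, ?_⟩
    · simp only [get_oid_loop, hget]
      rw [if_pos ⟨hlt, hset0⟩, ihs.1]
      push_cast
      rw [show p + 1 + (k : Int) + 1 = p + ((k : Int) + 1) + 1 from by ring]
      rw [PySem.List.pyRange_one_cons (show p < p + ((k : Int) + 1) + 1 by omega)]
      simp only [List.foldl_cons]
    · simp only [get_oid_scan, hget, if_pos hset0]
      rw [ihs.2]; push_cast; ring

-- ===== VERDICT (by name: the statement is the Claim_ definition above) =====
theorem get_oid_spec : Claim_equal_get_oid := by
  intro db p _ hpre
  obtain ⟨k, hk, hlo, hhi, hset, hclr⟩ := hpre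
  have h := get_oid_main db k p 0 (2 * db.length + 1) (by omega) ⟨hlo, hhi⟩ hset hclr
  unfold Spec_get_oid get_oid get_oid_alt
  rw [h.1, h.2]
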